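-- pv_equiv track=rewrite | github.com/cesar-richard/zb443 | tools/parse_flipper_sub.py | segment_frames
-- ===== SOURCE A (Python) =====
-- def segment_frames(values, sync_th):
--     frames, frame = [], []
--     for v in values:
--         if abs(v) >= sync_th:
--             if frame:
--                 frames.append(frame)
--                 frame = []
--         else:
--             frame.append(v)
--     if frame:
--         frames.append(frame)
--     return frames
-- ===== SOURCE B (Python) =====
-- def segment_frames(values, sync_th):
--     # Two-phase: partition into maximal runs keyed by "is sync marker",
--     # then keep the non-marker runs (groupby-style decomposition).
--     runs = []  # list of (is_sync, items) maximal runs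
--     for v in values:
--         k = abs(v) >= sync_th
--         if runs and runs[-1][0] == k:
--             runs[-1][1].append(v)
--         else:
--             runs.append((k, [v]))
--     return [items for k, items in runs if not k]
-- ===== Notes on version B (the rewrite author's own statement) =====
-- stated objective: idiomatic
-- what changed: Replaced the single-pass accumulator-with-reset loop by a groupby-style decomposition: first partition values into maximal runs keyed by the sync predicate, then keep exactly the non-marker runs.
import Mathlib
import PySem

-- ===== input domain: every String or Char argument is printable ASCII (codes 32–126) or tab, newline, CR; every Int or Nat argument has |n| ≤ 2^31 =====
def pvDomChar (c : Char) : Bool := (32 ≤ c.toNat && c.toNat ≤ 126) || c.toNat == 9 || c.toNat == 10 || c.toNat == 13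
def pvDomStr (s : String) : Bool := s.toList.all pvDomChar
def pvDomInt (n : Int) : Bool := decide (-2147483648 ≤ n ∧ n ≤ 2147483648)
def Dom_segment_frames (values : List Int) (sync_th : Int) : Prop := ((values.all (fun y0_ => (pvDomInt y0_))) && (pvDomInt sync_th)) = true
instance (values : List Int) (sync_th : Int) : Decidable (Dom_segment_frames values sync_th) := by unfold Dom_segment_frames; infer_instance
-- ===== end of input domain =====

-- B replaces A's accumulator-with-reset loop by a groupby-style run partition followed by a filter (same cost; idiomatic decomposition).

-- ===== PORT A =====
-- state = (frames, frame), exactly A's two locals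
def segAStep (sync_th : Int) (st : List (List Int) × List Int) (v : Int) : List (List Int) × List Int :=
  if |v| ≥ sync_th then
    if st.2 ≠ [] then (st.1 ++ [st.2], []) else st
  else
    (st.1, st.2 ++ [v])

def segment_frames (values : List Int) (sync_th : Int) : List (List Int) :=
  let st := values.foldl (segAStep sync_th) ([], [])
  if st.2 ≠ [] then st.1 ++ [st.2] else st.1

-- ===== PORT B =====
-- runs are kept newest-first (the usual Lean accumulator for Python's append-to-last);
-- runStep either extends the current (head) run or opens a new one, as Source B does on runs[-1]
def runStep (sync_th : Int) (runs : List (Bool × List Int)) (v : Int) : List (Bool × List Int) :=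
  let k : Bool := decide (|v| ≥ sync_th)
  match runs with
  | (k', items) :: rest => if k' == k then (k', items ++ [v]) :: rest else (k, [v]) :: (k', items) :: rest
  | [] => [(k, [v])]

def segment_frames_alt (values : List Int) (sync_th : Int) : List (List Int) :=
  (((values.foldl (runStep sync_th) []).reverse.filter (fun r => !r.1)).map Prod.snd)

-- ===== PRECONDITION & SPEC =====
def Spec_segment_frames (values : List Int) (sync_th : Int) (out : List (List Int)) : Prop := out = segment_frames_alt values sync_th
instance (values : List Int) (sync_th : Int) (out : List (List Int)) : Decidable (Spec_segment_frames values sync_th out) := by unfold Spec_segment_frames; infer_instance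

-- ===== CLAIM (what is proved, stated in full; the proofs are below) =====
def Claim_equal_segment_frames : Prop := ∀ (values : List Int) (sync_th : Int), Dom_segment_frames values sync_th → Spec_segment_frames values sync_th (segment_frames values sync_th)

-- ===== LEMMAS AND PROOFS =====

def mapfilter (l : List (Bool × List Int)) : List (List Int) :=
  (l.filter (fun r => !r.1)).map Prod.snd

-- invariant relating A's state to B's (reversed) run list
def SegInv (st : List (List Int) × List Int) (runs : List (Bool × List Int)) : Prop :=
  (st.2 = [] ∧ (runs = [] ∨ ∃ items rest, runs = (true, items) :: rest) ∧ mapfilter runs.reverse = st.1)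
  ∨ (∃ items rest, runs = (false, items) :: rest ∧ items = st.2 ∧ items ≠ [] ∧ mapfilter rest.reverse = st.1)

lemma mapfilter_append (a b : List (Bool × List Int)) :
    mapfilter (a ++ b) = mapfilter a ++ mapfilter b := by
  simp [mapfilter]

lemma inv_step (sync_th : Int) (st : List (List Int) × List Int) (runs : List (Bool × List Int))
    (v : Int) (h : SegInv st runs) : SegInv (segAStep sync_th st v) (runStep sync_th runs v) := by
  rcases h with ⟨h2, hhd, hmf⟩ | ⟨items, rest, hr, hit, hne, hmf⟩
  · -- current frame empty; head run (if any) is a sync run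
    by_cases hk : |v| ≥ sync_th
    · -- marker: A keeps its state; B extends/creates a true run
      have hA : segAStep sync_th st v = st := by simp [segAStep, hk, h2]
      rw [hA]
      rcases hhd with rfl | ⟨items, rest, rfl⟩
      · exact Or.inl ⟨h2, Or.inr ⟨[v], [], by simp [runStep, hk]⟩,
          by simpa [runStep, hk, mapfilter] using hmf⟩
      · refine Or.inl ⟨h2, Or.inr ⟨items ++ [v], rest, by simp [runStep, hk]⟩, ?_⟩
        have : runStep sync_th ((true, items) :: rest) v = (true, items ++ [v]) :: rest := by
          simp [runStep, hk]
        rw [this]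
        simpa [mapfilter_append, mapfilter] using hmf
    · -- non-marker: A starts frame [v]; B opens a new false run
      have hA : segAStep sync_th st v = (st.1, [v]) := by simp [segAStep, hk, h2]
      rw [hA]
      rcases hhd with rfl | ⟨items, rest, rfl⟩
      · exact Or.inr ⟨[v], [], by simp [runStep, hk], rfl, by simp, hmf⟩
      · exact Or.inr ⟨[v], (true, items) :: rest, by simp [runStep, hk], rfl, by simp, hmf⟩
  · -- current frame open; head run is the same open false run
    subst hr hit
    by_cases hk : |v| ≥ sync_th
    · -- marker: A closes the frame; B opens a true run in front
      have hA : segAStep sync_th st v = (st.1 ++ [st.2], []) := by simp [segAStep, hk, hne]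
      rw [hA]
      refine Or.inl ⟨rfl, Or.inr ⟨[v], (false, st.2) :: rest, by simp [runStep, hk]⟩, ?_⟩
      have : runStep sync_th ((false, st.2) :: rest) v = (true, [v]) :: (false, st.2) :: rest := by
        simp [runStep, hk]
      rw [this]
      simp only [mapfilter, List.filter_reverse, List.map_reverse] at hmf ⊢
      simp [hmf]
    · -- non-marker: both extend the open frame/run
      have hA : segAStep sync_th st v = (st.1, st.2 ++ [v]) := by simp [segAStep, hk]
      rw [hA]
      exact Or.inr ⟨st.2 ++ [v], rest, by simp [runStep, hk], rfl, by simp, hmf⟩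

lemma inv_fold (sync_th : Int) (vs : List Int) :
    ∀ (st : List (List Int) × List Int) (runs : List (Bool × List Int)),
      SegInv st runs → SegInv (vs.foldl (segAStep sync_th) st) (vs.foldl (runStep sync_th) runs) := by
  induction vs with
  | nil => intro st runs h; simpa using h
  | cons v vs ih =>
      intro st runs h
      simpa using ih _ _ (inv_step sync_th st runs v h)

-- ===== VERDICT (by name: the statement is the Claim_ definition above) =====
theorem segment_frames_spec : Claim_equal_segment_frames := by
  intro values sync_th _
  have h := inv_fold sync_th values ([], []) [] (Or.inl ⟨rfl, Or.inl rfl, rfl⟩)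
  show segment_frames values sync_th = segment_frames_alt values sync_th
  rcases h with ⟨h2, _, hmf⟩ | ⟨items, rest, hr, hit, hne, hmf⟩
  · simp [segment_frames, segment_frames_alt, h2, ← hmf, mapfilter]
  · simp [segment_frames, segment_frames_alt, hr, hne, ← hmf, ← hit, mapfilter]
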